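-- pv_equiv track=rewrite | github.com/Semert/Algorithms-Data-Structures | HackerRank/E - Migratory Birds.py | migratoryBirds
-- ===== SOURCE A (Python) =====
-- def migratoryBirds(arr):
--     ht = dict()
--     for i in arr:
--         if i in ht:
--             ht[i] += 1
--         else:
--             ht[i] = 1
--     result = []
--     for k,v in ht.items():
--         if ( ht[k] == max(ht.values())):
--             result.append(k)
--     return(min(result))
-- ===== SOURCE B (Python) =====
-- def migratoryBirds(arr):
--     return min(set(arr), key=lambda x: (-arr.count(x), x))
-- ===== Notes on version B (the rewrite author's own statement) =====
-- stated objective: idiomatic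
-- what changed: Replaces the count-dict plus max-filter plus min pipeline with a single min over the distinct elements keyed by (-count, value), whose lexicographic tie-break yields the smallest id directly.
-- outside the precondition, e.g. on migratoryBirds([]): A raises ValueError, B raises ValueError
import Mathlib
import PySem

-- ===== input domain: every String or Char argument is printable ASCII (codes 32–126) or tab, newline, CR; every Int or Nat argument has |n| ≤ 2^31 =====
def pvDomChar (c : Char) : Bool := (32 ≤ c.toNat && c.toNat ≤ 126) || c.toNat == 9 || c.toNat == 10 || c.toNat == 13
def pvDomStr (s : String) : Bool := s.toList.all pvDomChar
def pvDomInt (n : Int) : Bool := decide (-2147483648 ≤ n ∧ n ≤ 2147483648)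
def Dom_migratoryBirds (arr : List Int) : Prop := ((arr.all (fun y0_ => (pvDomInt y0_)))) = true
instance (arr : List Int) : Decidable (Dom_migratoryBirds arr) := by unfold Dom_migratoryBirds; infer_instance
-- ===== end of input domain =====

-- B replaces A's count-dict / max-filter / min pipeline with a single min over the distinct
-- elements keyed by (-count, value); objective: simpler/idiomatic, return value identical.

-- ===== PORT A =====
-- counting loop: 'if i in ht: ht[i] += 1 else: ht[i] = 1'
-- filter loop:   'if ht[k] == max(ht.values()): result.append(k)' (ht[k] is safe: k is a key)
-- 'max(ht.values())' / 'min(result)' are nonempty exactly when arr ≠ [] (Pre_); the .getD 0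
-- default is never reached inside Pre_.
def migratoryBirds (arr : List Int) : Int :=
  let ht : PySem.Dict Int Int :=
    arr.foldl (fun d i => if d.contains i then d.insert i (d.getD i 0 + 1) else d.insert i 1)
      PySem.Dict.empty
  let result : List Int :=
    ht.items.foldl
      (fun acc p =>
        if ht.getD p.1 0 = (PySem.List.max? ht.values (fun v => v)).getD 0 then acc ++ [p.1]
        else acc)
      []
  (PySem.List.min? result (fun x => x)).getD 0

-- ===== PORT B =====
-- 'min(set(arr), key=lambda x: (-arr.count(x), x))'; min of the empty set (arr = []) raises in
-- Python, excluded by Pre_, so the .getD 0 default is never reached.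
def migratoryBirds_alt (arr : List Int) : Int :=
  (PySem.List.min2? (PySem.Set.ofList arr) (fun x => -(arr.count x : Int)) (fun x => x)).getD 0

-- ===== PRECONDITION & SPEC =====
-- A raises ValueError (min of an empty list) on arr = []; so does B (min of an empty set).
def Pre_migratoryBirds (arr : List Int) : Prop := arr ≠ []
instance (arr : List Int) : Decidable (Pre_migratoryBirds arr) := by
  unfold Pre_migratoryBirds; infer_instance

def pvWitness_migratoryBirds : List Int := [1, 4, 4, 4, 5, 3]

def Spec_migratoryBirds (arr : List Int) (out : Int) : Prop := out = migratoryBirds_alt arr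
instance (arr : List Int) (out : Int) : Decidable (Spec_migratoryBirds arr out) := by
  unfold Spec_migratoryBirds; infer_instance

-- ===== CLAIM (what is proved, stated in full; the proofs are below) =====
def Claim_equal_migratoryBirds : Prop := ∀ (arr : List Int), Dom_migratoryBirds arr → Pre_migratoryBirds arr → Spec_migratoryBirds arr (migratoryBirds arr)

-- ===== LEMMAS AND PROOFS =====

-- The step function of PySem.List.min2? with an Int primary key and the identity secondary key.
def pvStep (k : Int → Int) : Option Int → Int → Option Int :=
  fun acc x =>
    match acc with
    | none => some x
    | some m =>
      if (decide (k x < k m) || !decide (k m < k x) && decide (x < m)) = true then some x else some m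

-- invariant of B's min2? fold: the accumulator is lex-minimal among the elements seen so far
lemma pvFold_spec (k : Int → Int) :
    ∀ (xs : List Int) (m0 m : Int), xs.foldl (pvStep k) (some m0) = some m →
      (m = m0 ∨ m ∈ xs) ∧
      (∀ y ∈ xs, k m < k y ∨ (k m = k y ∧ m ≤ y)) ∧
      (k m < k m0 ∨ (k m = k m0 ∧ m ≤ m0)) := by
  intro xs
  induction xs with
  | nil => intro m0 m h; simp at h; subst h; exact ⟨Or.inl rfl, by simp, Or.inr ⟨rfl, le_refl _⟩⟩
  | cons x t ih =>
    intro m0 m h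
    simp only [List.foldl_cons] at h
    by_cases hc : (decide (k x < k m0) || !decide (k m0 < k x) && decide (x < m0)) = true
    · rw [show pvStep k (some m0) x = some x from by simp [pvStep, hc]] at h
      obtain ⟨hmem, hall, hx0⟩ := ih x m h
      simp only [Bool.or_eq_true, Bool.and_eq_true, Bool.not_eq_true', decide_eq_true_eq,
        decide_eq_false_iff_not] at hc
      refine ⟨?_, ?_, ?_⟩
      · rcases hmem with h' | h'
        · exact Or.inr (by simp [h'])
        · exact Or.inr (List.mem_cons_of_mem _ h')
      · intro y hy
        rcases List.mem_cons.mp hy with rfl | hy'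
        · exact hx0
        · exact hall y hy'
      · rcases hx0 with h1 | ⟨h1, h1'⟩ <;> rcases hc with h2 | ⟨h2, h2'⟩ <;> omega
    · rw [show pvStep k (some m0) x = some m0 from by simp [pvStep, hc]] at h
      obtain ⟨hmem, hall, hx0⟩ := ih m0 m h
      simp only [Bool.or_eq_true, Bool.and_eq_true, Bool.not_eq_true', decide_eq_true_eq,
        decide_eq_false_iff_not, not_or, not_and, not_lt] at hc
      obtain ⟨hc1, hc2⟩ := hc
      refine ⟨?_, ?_, hx0⟩
      · rcases hmem with h' | h'
        · exact Or.inl h'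
        · exact Or.inr (List.mem_cons_of_mem _ h')
      · intro y hy
        rcases List.mem_cons.mp hy with rfl | hy'
        · -- y = x : m ≤lex m0 ≤lex x
          rcases eq_or_lt_of_le hc1 with h3 | h3
          · have h5 : m0 ≤ y := hc2 h3.ge
            rcases hx0 with h1 | ⟨h1, h1'⟩ <;> omega
          · rcases hx0 with h1 | ⟨h1, h1'⟩ <;> omega
        · exact hall y hy'

-- min2? with identity secondary key is the pvStep fold
lemma pvMin2_eq_foldl (xs : List Int) (k : Int → Int) :
    PySem.List.min2? xs k (fun x => x) = xs.foldl (pvStep k) none := by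
  unfold PySem.List.min2?
  congr 1
  funext acc x
  cases acc <;> simp [pvStep]

lemma pvFold_none_spec (k : Int → Int) (xs : List Int) (m : Int)
    (h : xs.foldl (pvStep k) none = some m) :
    m ∈ xs ∧ ∀ y ∈ xs, k m < k y ∨ (k m = k y ∧ m ≤ y) := by
  cases xs with
  | nil => simp at h
  | cons c t =>
    rw [List.foldl_cons] at h
    have h' : t.foldl (pvStep k) (some c) = some m := h
    obtain ⟨hmem, hall, hc0⟩ := pvFold_spec k t c m h'
    refine ⟨?_, ?_⟩
    · rcases hmem with rfl | hm
      · exact List.mem_cons_self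
      · exact List.mem_cons_of_mem _ hm
    · intro y hy
      rcases List.mem_cons.mp hy with rfl | hy'
      · exact hc0
      · exact hall y hy'

lemma pvMin2_spec (arr : List Int) (m : Int)
    (h : PySem.List.min2? (PySem.Set.ofList arr) (fun x => -(arr.count x : Int)) (fun x => x)
        = some m) :
    m ∈ PySem.Set.ofList arr ∧
      ∀ y ∈ PySem.Set.ofList arr, (arr.count y : Int) < arr.count m ∨
        ((arr.count m : Int) = arr.count y ∧ m ≤ y) := by
  rw [pvMin2_eq_foldl] at h
  obtain ⟨hmem, hall⟩ := pvFold_none_spec _ _ _ h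
  refine ⟨hmem, ?_⟩
  intro y hy
  rcases hall y hy with h1 | ⟨h1, h1'⟩
  · exact Or.inl (by omega)
  · exact Or.inr ⟨by omega, h1'⟩

-- A's counting loop is Counter(arr)
lemma pvHt_eq_counter (arr : List Int) :
    arr.foldl (fun d i => if d.contains i then d.insert i (d.getD i 0 + 1) else d.insert i 1)
      PySem.Dict.empty = PySem.Dict.counter arr := by
  rw [← PySem.Dict.foldl_insert_getD_add_one_eq_counter]
  apply PySem.List.foldl_congr_mem
  intro d i _
  by_cases hc : d.contains i
  · simp [hc]
  · have hc' : d.contains i = false := by simpa using hc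
    simp [hc, PySem.Dict.getD_of_not_contains d (0 : Int) hc']

-- A's filter loop over items = the distinct elements whose count equals the max count
lemma pvResult_eq (arr : List Int) :
    (PySem.Dict.counter arr).items.foldl
      (fun acc (p : Int × Int) =>
        if (PySem.Dict.counter arr).getD p.1 0
            = (PySem.List.max? (PySem.Dict.counter arr).values (fun v => v)).getD 0
          then acc ++ [p.1] else acc) []
    = ((PySem.Set.ofList arr).filter
        (fun k => decide ((arr.count k : Int)
          = (PySem.List.max? (PySem.Dict.counter arr).values (fun v => v)).getD 0))) := by
  rw [PySem.List.foldl_append_ite]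
  simp only [PySem.Dict.items_counter, List.filter_map, List.map_map, List.nil_append]
  simp [Function.comp_def, PySem.Dict.getD_counter]

-- B's min2? always returns a value on a nonempty list
lemma pvFold_some (k : Int → Int) :
    ∀ (t : List Int) (m0 : Int), ∃ m, t.foldl (pvStep k) (some m0) = some m := by
  intro t
  induction t with
  | nil => exact fun m0 => ⟨m0, rfl⟩
  | cons x t ih =>
    intro m0
    rw [List.foldl_cons]
    by_cases hc : (decide (k x < k m0) || !decide (k m0 < k x) && decide (x < m0)) = true
    · rw [show pvStep k (some m0) x = some x from by simp [pvStep, hc]]; exact ih x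
    · rw [show pvStep k (some m0) x = some m0 from by simp [pvStep, hc]]; exact ih m0

-- the counter's value list, spelled over the distinct elements
lemma pvValues_eq (arr : List Int) :
    (PySem.Dict.counter arr).values
      = (PySem.Set.ofList arr).map (fun k => (arr.count k : Int)) := by
  simp [PySem.Dict.values, PySem.Dict.items_counter, List.map_map, Function.comp_def]

-- ===== VERDICT (by name: the statement is the Claim_ definition above) =====
theorem migratoryBirds_spec : Claim_equal_migratoryBirds := by
  intro arr _ hpre
  unfold Spec_migratoryBirds
  show migratoryBirds arr = migratoryBirds_alt arr
  unfold migratoryBirds migratoryBirds_alt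
  rw [pvHt_eq_counter]
  dsimp only
  rw [pvResult_eq]
  -- the distinct elements are nonempty
  have hS : (PySem.Set.ofList arr : List Int) ≠ [] := by
    intro h0
    cases arr with
    | nil => exact hpre rfl
    | cons a t =>
      have ha : a ∈ PySem.Set.ofList (a :: t) :=
        (PySem.Set.mem_ofList _ _).mpr List.mem_cons_self
      rw [h0] at ha
      simp at ha
  -- the max count M0
  obtain ⟨M0, hM0⟩ : ∃ M0, PySem.List.max? (PySem.Dict.counter arr).values (fun v => v)
      = some M0 := by
    cases hm : PySem.List.max? (PySem.Dict.counter arr).values (fun v => v) with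
    | none =>
      rw [PySem.List.max?_eq_none_iff, pvValues_eq, List.map_eq_nil_iff] at hm
      exact absurd hm hS
    | some v => exact ⟨v, rfl⟩
  have hMub : ∀ y ∈ PySem.Set.ofList arr, (arr.count y : Int) ≤ M0 := by
    intro y hy
    have := PySem.List.max?_isMax hM0 ((arr.count y : Int)) (by
      rw [pvValues_eq]; exact List.mem_map_of_mem hy)
    simpa using this
  obtain ⟨y0, hy0S, hy0⟩ : ∃ y0 ∈ PySem.Set.ofList arr, (arr.count y0 : Int) = M0 := by
    have := PySem.List.max?_mem hM0
    rw [pvValues_eq] at this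
    obtain ⟨y0, hy0, he⟩ := List.mem_map.mp this
    exact ⟨y0, hy0, he⟩
  -- B's minimiser
  obtain ⟨b, hb⟩ : ∃ b, PySem.List.min2? (PySem.Set.ofList arr)
      (fun x => -(arr.count x : Int)) (fun x => x) = some b := by
    cases hSc : (PySem.Set.ofList arr : List Int) with
    | nil => exact absurd hSc hS
    | cons c t =>
      rw [pvMin2_eq_foldl, List.foldl_cons]
      exact pvFold_some _ t c
  obtain ⟨hbS, hball⟩ := pvMin2_spec arr b hb
  -- b has the max count
  have hbM : (arr.count b : Int) = M0 := by
    have h1 := hMub b hbS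
    rcases hball y0 hy0S with h2 | ⟨h2, _⟩ <;> omega
  -- b is in A's result list
  have hbR : b ∈ (PySem.Set.ofList arr).filter
      (fun k => decide ((arr.count k : Int)
        = (PySem.List.max? (PySem.Dict.counter arr).values (fun v => v)).getD 0)) := by
    rw [List.mem_filter]
    exact ⟨hbS, by rw [hM0]; simpa using hbM⟩
  -- A's minimum
  obtain ⟨a, ha⟩ : ∃ a, PySem.List.min? ((PySem.Set.ofList arr).filter
      (fun k => decide ((arr.count k : Int)
        = (PySem.List.max? (PySem.Dict.counter arr).values (fun v => v)).getD 0)))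
      (fun x => x) = some a := by
    cases hm : PySem.List.min? ((PySem.Set.ofList arr).filter
        (fun k => decide ((arr.count k : Int)
          = (PySem.List.max? (PySem.Dict.counter arr).values (fun v => v)).getD 0)))
        (fun x => x) with
    | none =>
      rw [PySem.List.min?_eq_none_iff] at hm
      rw [hm] at hbR
      simp at hbR
    | some v => exact ⟨v, rfl⟩
  have haR := PySem.List.min?_mem ha
  have haS : a ∈ PySem.Set.ofList arr := (List.mem_filter.mp haR).1
  have haM : (arr.count a : Int) = M0 := by
    have := (List.mem_filter.mp haR).2
    rw [hM0] at this
    simpa using this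
  have hab : a ≤ b := by
    have := PySem.List.min?_isMin ha b hbR
    simpa using this
  have hba : b ≤ a := by
    rcases hball a haS with h2 | ⟨_, h2⟩
    · omega
    · exact h2
  rw [ha, hb]
  simp
  omega
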